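-- pv_equiv track=rewrite | github.com/ishrith-gowda/NeuroScope | tools/lowercase_codebase.py | lowercase_comments
-- ===== SOURCE A (Python) =====
-- def lowercase_comments(line: str) -> str:
--     """lowercase the comment portion of a line."""
--     # find inline comment (not inside a string)
--     # simple approach: find # that's not inside quotes
--     in_single = False
--     in_double = False
--     for i, ch in enumerate(line):
--         if ch == "'" and not in_double:
--             in_single = not in_single
--         elif ch == '"' and not in_single:
--             in_double = not in_double
--         elif ch == '#' and not in_single and not in_double:
--             # found comment start
--             code_part = line[:i]
--             comment_part = line[i:]
--             # lowercase the comment text but preserve # and spacing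
--             if comment_part.startswith('#'):
--                 # preserve section dividers like # ====== or # ------
--                 stripped = comment_part.lstrip('#').lstrip()
--                 if stripped and all(c in '=-~*' for c in stripped.rstrip()):
--                     return line
--                 # preserve shebang
--                 if comment_part.startswith('#!'):
--                     return line
--                 # preserve encoding declarations
--                 if 'coding' in comment_part and (':' in comment_part or '=' in comment_part):
--                     return line
--                 # preserve noqa, type: ignore, fmt: directives
--                 if any(d in comment_part.lower() for d in ['noqa', 'type: ignore', 'fmt:', 'pragma:', 'pylint:']):
--                     return line
--                 return code_part + comment_part.lower()
--             return line
--     return line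
-- ===== SOURCE B (Python) =====
-- def lowercase_comments(line: str) -> str:
--     """lowercase the comment portion of a line."""
--     # Jump-based scan: find the first '#' outside quotes by hopping with str.find
--     # instead of a per-character state machine.
--     p = 0
--     while True:
--         hits = [k for k in (line.find(c, p) for c in ("'", '"', '#')) if k != -1]
--         if not hits:
--             return line
--         j = min(hits)
--         if line[j] == '#':
--             break
--         close = line.find(line[j], j + 1)
--         if close == -1:
--             return line
--         p = close + 1
--     comment = line[j:]
--     body = comment.lstrip('#').strip()
--     if body and set(body) <= set('=-~*'):
--         return line
--     if comment.startswith('#!'):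
--         return line
--     if 'coding' in comment and not set(':=').isdisjoint(comment):
--         return line
--     low = comment.lower()
--     if any(d in low for d in ('noqa', 'type: ignore', 'fmt:', 'pragma:', 'pylint:')):
--         return line
--     return line[:j] + low
-- ===== Notes on version B (the rewrite author's own statement) =====
-- stated objective: faster
-- what changed: A scans every character with an in_single/in_double boolean state machine; B instead jumps with str.find from one interesting character (quote or '#') to the next, skipping each string literal in one hop to its matching closing quote, then applies the same guard cascade phrased via strip/set operations.
import Mathlib
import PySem

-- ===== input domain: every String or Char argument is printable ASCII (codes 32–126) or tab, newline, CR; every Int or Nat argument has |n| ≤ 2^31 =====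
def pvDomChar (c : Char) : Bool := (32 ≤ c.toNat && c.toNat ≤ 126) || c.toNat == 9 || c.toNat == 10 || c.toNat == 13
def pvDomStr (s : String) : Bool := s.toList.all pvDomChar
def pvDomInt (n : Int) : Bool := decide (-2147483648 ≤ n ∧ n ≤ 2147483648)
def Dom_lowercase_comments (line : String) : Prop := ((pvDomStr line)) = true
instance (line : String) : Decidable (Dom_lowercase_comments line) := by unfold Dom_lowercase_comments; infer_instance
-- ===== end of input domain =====

-- B replaces A's per-character quote state machine by a find-based jump scan
-- (hop to the next quote/'#', skip whole string literals via the matching close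
-- quote); same exact result, measured faster (find hops instead of a per-char loop).

-- ===== PORT A =====
-- the for-loop with its in_single/in_double state, as structural recursion
def scanA : List Char → Bool → Bool → Nat → Option Nat
  | [], _, _, _ => none
  | c :: cs, sq, dq, i =>
    if c == '\'' && !dq then scanA cs (!sq) dq (i+1)
    else if c == '"' && !sq then scanA cs sq (!dq) (i+1)
    else if c == '#' && !sq && !dq then some i
    else scanA cs sq dq (i+1)

def lowercase_comments (line : String) : String :=
  let l := line.toList
  match scanA l false false 0 with
  | none => line
  | some i =>
    let code := PySem.List.slice l none (some (i : Int))      -- line[:i]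
    let comment := PySem.List.slice l (some (i : Int)) none   -- line[i:]
    if PySem.Chars.startswith comment ['#'] then
      -- comment_part.lstrip('#') ported by hand as dropWhile (= '#') (exact: strips leading '#'s)
      let stripped := PySem.Chars.lstrip (comment.dropWhile (· == '#'))
      if (!stripped.isEmpty) && (PySem.Chars.rstrip stripped).all (fun c => PySem.Chars.isIn [c] ['=','-','~','*']) then line
      else if PySem.Chars.startswith comment ['#','!'] then line
      else if PySem.Chars.isIn ['c','o','d','i','n','g'] comment && (PySem.Chars.isIn [':'] comment || PySem.Chars.isIn ['='] comment) then line
      else if [['n','o','q','a'], ['t','y','p','e',':',' ','i','g','n','o','r','e'], ['f','m','t',':'], ['p','r','a','g','m','a',':'], ['p','y','l','i','n','t',':']].any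
                (fun d => PySem.Chars.isIn d (PySem.Chars.lower comment)) then line
      else String.ofList (code ++ PySem.Chars.lower comment)
    else line

-- ===== PORT B =====
-- line.find(c, p) for one char c and a nonnegative start p (exact on these uses)
def findCharFrom (l : List Char) (c : Char) (p : Nat) : Option Nat :=
  ((l.drop p).findIdx? (· == c)).map (p + ·)

theorem findCharFrom_some {l : List Char} {c : Char} {p k : Nat}
    (h : findCharFrom l c p = some k) : p ≤ k ∧ k < l.length := by
  unfold findCharFrom at h
  rcases Option.map_eq_some_iff.mp h with ⟨r, hr, hk⟩
  rcases List.findIdx?_eq_some_iff_getElem.mp hr with ⟨hlt, _, _⟩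
  have hlen : (l.drop p).length = l.length - p := List.length_drop
  omega

-- the while-loop: hits = surviving finds, j = min(hits); on a quote jump past
-- the matching close quote, on '#' stop
def scanB (l : List Char) (p : Nat) : Option Nat :=
  match hm : ([findCharFrom l '\'' p, findCharFrom l '"' p, findCharFrom l '#' p].filterMap id).min? with
  | none => none
  | some j =>
    match l[j]? with
    | some '#' => some j
    | some q =>
      match hc : findCharFrom l q (j+1) with
      | none => none
      | some close => scanB l (close+1)
    | none => none  -- unreachable: j is an index returned by find
termination_by l.length - p
decreasing_by
  have hj := List.min?_mem (by exact hm)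
  simp only [List.mem_filterMap, List.mem_cons, id] at hj
  have hjb : p ≤ j ∧ j < l.length := by
    rcases hj with ⟨o, ho, hid⟩
    rcases ho with h1 | h1 | h1 | h1 <;> first
      | (subst h1; exact findCharFrom_some hid)
      | simp at h1
  have hcb := findCharFrom_some hc
  omega

def lowercase_comments_alt (line : String) : String :=
  let l := line.toList
  match scanB l 0 with
  | none => line
  | some j =>
    let comment := l.drop j              -- line[j:]
    let body := PySem.Chars.strip (comment.dropWhile (· == '#'))
    if (!body.isEmpty) && body.all (fun c => ['=','-','~','*'].contains c) then line
    else if PySem.Chars.startswith comment ['#','!'] then line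
    else if PySem.Chars.isIn ['c','o','d','i','n','g'] comment && comment.any (fun c => c == ':' || c == '=') then line
    else
      let low := PySem.Chars.lower comment
      if [['n','o','q','a'], ['t','y','p','e',':',' ','i','g','n','o','r','e'], ['f','m','t',':'], ['p','r','a','g','m','a',':'], ['p','y','l','i','n','t',':']].any
           (fun d => PySem.Chars.isIn d low) then line
      else String.ofList (l.take j ++ low)

-- ===== PRECONDITION & SPEC =====
def Spec_lowercase_comments (line : String) (out : String) : Prop := out = lowercase_comments_alt line
instance (line : String) (out : String) : Decidable (Spec_lowercase_comments line out) := by unfold Spec_lowercase_comments; infer_instance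

-- ===== CLAIM (what is proved, stated in full; the proofs are below) =====
def Claim_equal_lowercase_comments : Prop := ∀ (line : String), Dom_lowercase_comments line → Spec_lowercase_comments line (lowercase_comments line)

-- ===== LEMMAS AND PROOFS =====

def specialC (c : Char) : Bool := c == '\'' || c == '"' || c == '#'

-- scanA skips runs of uninteresting characters
theorem scanA_skip_plain (m rest : List Char) (i : Nat) (h : ∀ c ∈ m, specialC c = false) :
    scanA (m ++ rest) false false i = scanA rest false false (i + m.length) := by
  induction m generalizing i with
  | nil => simp
  | cons c cs ih =>
    have hc := h c (by simp)
    simp only [specialC, Bool.or_eq_false_iff, beq_eq_false_iff_ne] at hc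
    simp only [List.cons_append, scanA]
    rw [if_neg (by simp [hc.1.1]), if_neg (by simp [hc.1.2]), if_neg (by simp [hc.2])]
    rw [ih (i+1) (fun c hc => h c (by simp [hc]))]
    simp [List.length_cons]; ring_nf

-- inside a single-quoted string scanA only reacts to '\''
theorem scanA_skip_single (m rest : List Char) (i : Nat) (h : '\'' ∉ m) :
    scanA (m ++ rest) true false i = scanA rest true false (i + m.length) := by
  induction m generalizing i with
  | nil => simp
  | cons c cs ih =>
    have hc : ¬ (c = '\'') := fun e => h (by simp [e])
    simp only [List.cons_append, scanA]
    rw [if_neg (by simp [hc]), if_neg (by simp), if_neg (by simp)]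
    rw [ih (i+1) (fun e => h (by simp [e]))]
    simp [List.length_cons]; ring_nf

-- inside a double-quoted string scanA only reacts to '"'
theorem scanA_skip_double (m rest : List Char) (i : Nat) (h : '"' ∉ m) :
    scanA (m ++ rest) false true i = scanA rest false true (i + m.length) := by
  induction m generalizing i with
  | nil => simp
  | cons c cs ih =>
    have hc : ¬ (c = '"') := fun e => h (by simp [e])
    simp only [List.cons_append, scanA]
    rw [if_neg (by simp), if_neg (by simp [hc]), if_neg (by simp)]
    rw [ih (i+1) (fun e => h (by simp [e]))]
    simp [List.length_cons]; ring_nf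

-- if scanA finds a comment, that index carries '#'
theorem scanA_some_hash (cs : List Char) (sq dq : Bool) (i j : Nat)
    (h : scanA cs sq dq i = some j) : i ≤ j ∧ cs[j - i]? = some '#' := by
  induction cs generalizing sq dq i with
  | nil => simp [scanA] at h
  | cons c cs ih =>
    simp only [scanA] at h
    split_ifs at h with h1 h2 h3
    · have := ih _ _ _ h; constructor
      · omega
      · have hj : j - i = (j - (i+1)) + 1 := by omega
        rw [hj]; simpa using this.2
    · have := ih _ _ _ h; constructor
      · omega
      · have hj : j - i = (j - (i+1)) + 1 := by omega
        rw [hj]; simpa using this.2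
    · cases h
      simp only [Bool.and_eq_true, beq_iff_eq] at h3
      simp [h3.1]
    · have := ih _ _ _ h; constructor
      · omega
      · have hj : j - i = (j - (i+1)) + 1 := by omega
        rw [hj]; simpa using this.2

-- min over the three surviving finds
theorem minHits (o1 o2 o3 : Option Nat) (j : Nat)
    (hmem : o1 = some j ∨ o2 = some j ∨ o3 = some j)
    (hle : ∀ k, o1 = some k ∨ o2 = some k ∨ o3 = some k → j ≤ k) :
    ([o1, o2, o3].filterMap id).min? = some j := by
  apply List.min?_eq_some_iff.mpr
  constructor
  · simp only [List.mem_filterMap, List.mem_cons, id]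
    rcases hmem with h | h | h
    · exact ⟨o1, by simp, h⟩
    · exact ⟨o2, by simp, h⟩
    · exact ⟨o3, by simp, h⟩
  · intro b hb
    simp only [List.mem_filterMap, List.mem_cons, id] at hb
    rcases hb with ⟨o, ho, hid⟩
    rcases ho with h1 | h1 | h1 | h1
    · exact hle b (Or.inl (h1 ▸ hid))
    · exact hle b (Or.inr (Or.inl (h1 ▸ hid)))
    · exact hle b (Or.inr (Or.inr (h1 ▸ hid)))
    · simp at h1

theorem minHits_none (o1 o2 o3 : Option Nat) (h1 : o1 = none) (h2 : o2 = none) (h3 : o3 = none) :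
    ([o1, o2, o3].filterMap id).min? = none := by
  subst h1; subst h2; subst h3; rfl

-- findCharFrom in terms of the takeWhile/dropWhile decomposition of l.drop p
theorem findCharFrom_split (l : List Char) (c : Char) (p : Nat) (m r : List Char)
    (hs : l.drop p = m ++ r) (hmc : ∀ x ∈ m, ¬ x = c) :
    findCharFrom l c p = (r.findIdx? (· == c)).map (fun i => p + (i + m.length)) := by
  unfold findCharFrom
  rw [hs, List.findIdx?_append]
  have : m.findIdx? (· == c) = none := by
    rw [List.findIdx?_eq_none_iff]; intro x hx; simpa using hmc x hx
  rw [this, Option.none_or, Option.map_map]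
  rfl

-- head of a dropWhile fails the predicate
theorem dropWhile_head (p : Char → Bool) (l : List Char) (c : Char) (t : List Char)
    (h : l.dropWhile p = c :: t) : p c = false := by
  induction l with
  | nil => simp [List.dropWhile] at h
  | cons a as ih =>
    by_cases hp : p a
    · exact ih (by simpa [List.dropWhile, hp] using h)
    · rw [List.dropWhile_cons_of_neg (by simpa using hp)] at h
      cases h; simpa using hp

-- THE SCAN EQUIVALENCE: the jump scan equals the state machine
theorem scanB_eq_scanA (l : List Char) (p : Nat) :
    scanB l p = scanA (l.drop p) false false p := by
  generalize hfuel : l.length - p = fuel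
  induction fuel using Nat.strong_induction_on generalizing p with
  | _ fuel ih =>
  subst hfuel
  set s := l.drop p with hs
  have hsplit : s = s.takeWhile (fun c => !specialC c) ++ s.dropWhile (fun c => !specialC c) :=
    (List.takeWhile_append_dropWhile).symm
  set m := s.takeWhile (fun c => !specialC c) with hmdef
  set r := s.dropWhile (fun c => !specialC c) with hrdef
  have hmns : ∀ x ∈ m, specialC x = false := by
    intro x hx
    have := List.mem_takeWhile_imp hx
    simpa using this
  rw [scanB]
  cases hr : r with
  | nil =>
    -- no special char at all: all finds are none, scanA runs off the end
    have hnone : ∀ c, specialC c = true → findCharFrom l c p = none := by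
      intro c hc
      unfold findCharFrom
      rw [← hs, hsplit, hr, List.append_nil, Option.map_eq_none_iff, List.findIdx?_eq_none_iff]
      intro x hx
      have hxs := hmns x hx
      simp only [beq_eq_false_iff_ne]
      intro he
      rw [he] at hxs; rw [hxs] at hc; exact absurd hc (by simp)
    rw [minHits_none _ _ _ (hnone _ (by decide)) (hnone _ (by decide)) (hnone _ (by decide))]
    rw [hsplit, hr]
    rw [scanA_skip_plain m [] p hmns]
    rfl
  | cons c0 t =>
    have hc0 : specialC c0 = true := by
      have := dropWhile_head _ s c0 t hr
      simpa using this
    have hsapp : l.drop p = m ++ c0 :: t := by rw [← hs, hsplit, hr]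
    -- the three finds, relative to the decomposition
    have hfind : ∀ c, specialC c = true →
        findCharFrom l c p = (((c0 :: t).findIdx? (· == c)).map (fun i => p + (i + m.length))) := by
      intro c hc
      apply findCharFrom_split l c p m (c0 :: t) hsapp
      intro x hx he
      have := hmns x hx
      rw [he] at this; rw [this] at hc; exact absurd hc (by simp)
    have hj : ([findCharFrom l '\'' p, findCharFrom l '"' p, findCharFrom l '#' p].filterMap id).min?
        = some (p + m.length) := by
      apply minHits
      · -- the find for c0 itself returns p + m.length
        have h0 : findCharFrom l c0 p = some (p + m.length) := by
          rw [hfind c0 hc0, List.findIdx?_cons, if_pos (by simp)]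
          simp
        have hc0' : c0 = '\'' ∨ c0 = '"' ∨ c0 = '#' := by
          simpa [specialC, or_assoc] using hc0
        rcases hc0' with h | h | h
        · exact Or.inl (h ▸ h0)
        · exact Or.inr (Or.inl (h ▸ h0))
        · exact Or.inr (Or.inr (h ▸ h0))
      · -- every surviving find is ≥ p + m.length
        intro k hk
        have hgen : ∀ c, specialC c = true → findCharFrom l c p = some k → p + m.length ≤ k := by
          intro c hc hfc
          rw [hfind c hc] at hfc
          rcases Option.map_eq_some_iff.mp hfc with ⟨i, _, hki⟩
          omega
        rcases hk with h | h | h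
        · exact hgen _ (by decide) h
        · exact hgen _ (by decide) h
        · exact hgen _ (by decide) h
    split
    · rename_i heq; rw [hj] at heq; cases heq
    · rename_i j heq
      rw [hj] at heq
      injection heq with heq; subst heq
      have hgetj : l[p + m.length]? = some c0 := by
        have : (l.drop p)[m.length]? = some c0 := by
          rw [hsapp]; simp
        rw [List.getElem?_drop] at this
        exact this
      -- scanA side: skip the plain prefix
      rw [hs, hsapp, scanA_skip_plain m (c0 :: t) p hmns]
      split
      · -- l[j]? = some '#'
        rename_i hq
        rw [hgetj] at hq; injection hq with hq; subst hq
        simp [scanA]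
      · -- l[j]? = some q, a quote
        rename_i q hne heq
        rw [hgetj] at heq
        injection heq with heq
        rw [← heq] at hne ⊢
        have hq' : c0 = '\'' ∨ c0 = '"' := by
          have h3 : c0 = '\'' ∨ c0 = '"' ∨ c0 = '#' := by simpa [specialC, or_assoc] using hc0
          rcases h3 with h | h | h
          · exact Or.inl h
          · exact Or.inr h
          · exact absurd h hne
        -- decompose t around the closing quote
        have hdropj : l.drop (p + m.length + 1) = t := by
          have : l.drop (p + m.length + 1) = (l.drop p).drop (m.length + 1) := by
            rw [List.drop_drop]; ring_nf
          rw [this, hsapp]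
          simp
        set m2 := t.takeWhile (fun c => !(c == c0)) with hm2def
        set r2 := t.dropWhile (fun c => !(c == c0)) with hr2def
        have ht2 : t = m2 ++ r2 := (List.takeWhile_append_dropWhile).symm
        have hm2ne : ∀ x ∈ m2, ¬ x = c0 := by
          intro x hx
          have := List.mem_takeWhile_imp hx
          simpa using this
        cases hr2 : r2 with
        | nil =>
          -- no closing quote: both sides give none
          have hfc : findCharFrom l c0 (p + m.length + 1) = none := by
            unfold findCharFrom
            rw [hdropj, ht2, hr2, List.append_nil, Option.map_eq_none_iff, List.findIdx?_eq_none_iff]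
            intro x hx; simpa using hm2ne x hx
          split
          · -- scanA: skip whole string in open state, run off the end
            have ht : t = m2 ++ [] := by rw [← hr2, ← ht2]
            rcases hq' with h | h <;> subst h
            · simp only [scanA, Bool.not_false]
              rw [if_pos (by simp), ht, scanA_skip_single m2 [] (p + m.length + 1)
                    (fun hx => hm2ne _ hx rfl)]
              rfl
            · simp only [scanA, Bool.not_false]
              rw [if_neg (by simp), if_pos (by simp), ht, scanA_skip_double m2 [] (p + m.length + 1)
                    (fun hx => hm2ne _ hx rfl)]
              rfl
          · rename_i close hc
            rw [hfc] at hc; cases hc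
        | cons cq t2 =>
          have hcq : cq = c0 := by
            have := dropWhile_head _ t cq t2 (by rw [← hr2def, hr2])
            simpa using this
          subst hcq
          have hfc : findCharFrom l cq (p + m.length + 1) = some (p + m.length + 1 + m2.length) := by
            unfold findCharFrom
            rw [hdropj, ht2, hr2, List.findIdx?_append]
            have hn : m2.findIdx? (· == cq) = none := by
              rw [List.findIdx?_eq_none_iff]; intro x hx; simpa using hm2ne x hx
            rw [hn, Option.none_or, List.findIdx?_cons, if_pos (by simp)]
            simp
          split
          · rename_i hcn; rw [hfc] at hcn; cases hcn
          · rename_i close hc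
            rw [hfc] at hc
            injection hc with hc; subst hc
            -- both sides recurse/continue at close+1
            have hdropc : l.drop (p + m.length + 1 + m2.length + 1) = t2 := by
              have : l.drop (p + m.length + 1 + m2.length + 1) = (l.drop (p + m.length + 1)).drop (m2.length + 1) := by
                rw [List.drop_drop]; ring_nf
              rw [this, hdropj, ht2, hr2]
              simp
            have hplen : p + m.length < l.length := by
              have : (l.drop p).length = l.length - p := List.length_drop
              rw [hsapp] at this
              simp at this
              omega
            have hclen : p + m.length + 1 + m2.length < l.length := by
              have h1 := findCharFrom_some hfc
              omega
            have hrec := ih (l.length - (p + m.length + 1 + m2.length + 1)) (by omega)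
              (p + m.length + 1 + m2.length + 1) rfl
            rw [hrec, hdropc]
            -- scanA: toggle open, skip m2, toggle closed
            have ht : t = m2 ++ cq :: t2 := by rw [← hr2, ← ht2]
            rcases hq' with h | h <;> subst h
            · simp only [scanA, Bool.not_false]
              rw [if_pos (by simp), ht, scanA_skip_single m2 ('\'' :: t2) (p + m.length + 1)
                    (fun hx => hm2ne _ hx rfl)]
              simp only [scanA, Bool.not_false]
              rw [if_pos (by simp)]
              simp only [Bool.not_true]
            · simp only [scanA, Bool.not_false]
              rw [if_neg (by simp), if_pos (by simp), ht, scanA_skip_double m2 ('"' :: t2) (p + m.length + 1)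
                    (fun hx => hm2ne _ hx rfl)]
              simp only [scanA, Bool.not_false]
              rw [if_neg (by simp), if_pos (by simp)]
              simp only [Bool.not_true]
      · -- l[j]? = none: impossible
        rename_i hq
        rw [hgetj] at hq; cases hq

-- single-char membership tests agree
theorem isIn_singleton (c : Char) (s : List Char) : PySem.Chars.isIn [c] s = s.contains c := by
  rcases h : s.contains c with _ | _
  · rw [PySem.Chars.isIn_eq_false_iff]
    intro hin
    rcases hin with ⟨u, v, huv⟩
    have : c ∈ s := by rw [← huv]; simp
    simp [List.contains_eq_mem] at h
    exact h this
  · rw [PySem.Chars.isIn_iff_infix]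
    simp only [List.contains_eq_mem, decide_eq_true_eq] at h
    rcases List.mem_iff_append.mp h with ⟨u, v, huv⟩
    exact ⟨u, v, by simp [huv]⟩

-- an lstripped nonempty string survives rstrip
theorem rstrip_lstrip_ne (x : List Char) (h : ¬ (PySem.Chars.lstrip x).isEmpty = true) :
    ¬ (PySem.Chars.rstrip (PySem.Chars.lstrip x)).isEmpty = true := by
  intro hem
  apply h
  simp only [PySem.Chars.rstrip, PySem.Chars.lstrip, List.isEmpty_iff,
    List.reverse_eq_nil_iff] at *
  have hall : ∀ c ∈ x.dropWhile PySem.Chars.isspace, PySem.Chars.isspace c = true := by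
    intro c hc
    have : c ∈ (x.dropWhile PySem.Chars.isspace).reverse := by simpa using hc
    have h2 := List.dropWhile_eq_nil_iff.mp hem
    exact h2 c this
  cases hd : x.dropWhile PySem.Chars.isspace with
  | nil => rfl
  | cons a as =>
    have h1 := dropWhile_head _ x a as hd
    have h2 := hall a (by rw [hd]; simp)
    rw [h1] at h2; cases h2

-- ===== VERDICT (by name: the statement is the Claim_ definition above) =====
theorem lowercase_comments_spec : Claim_equal_lowercase_comments := by
  intro line _
  unfold Spec_lowercase_comments
  unfold lowercase_comments lowercase_comments_alt
  simp only
  rw [scanB_eq_scanA, List.drop_zero]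
  cases hscan : scanA line.toList false false 0 with
  | none => rfl
  | some j =>
    have hhash := scanA_some_hash _ _ _ _ _ hscan
    simp only [Nat.sub_zero] at hhash
    have hj : j < line.toList.length := by
      rcases List.getElem?_eq_some_iff.mp hhash.2 with ⟨h, _⟩; exact h
    dsimp only
    -- slices are take/drop
    rw [PySem.List.slice_to _ (by positivity), PySem.List.slice_from _ (by positivity)]
    simp only [Int.toNat_natCast]
    set comment := line.toList.drop j with hcdef
    -- the comment starts with '#'
    have hcomm : comment = '#' :: line.toList.drop (j+1) := by
      rw [hcdef, List.drop_eq_getElem_cons hj]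
      congr 1
      rw [← List.getElem?_eq_some_iff.mp hhash.2 |>.2]
    rw [if_pos (by rw [hcomm]; rw [PySem.Chars.startswith_iff]; exact ⟨_, rfl⟩)]
    -- the guard cascades agree condition by condition
    have hdiv : ((!(PySem.Chars.lstrip (comment.dropWhile (· == '#'))).isEmpty) &&
        (PySem.Chars.rstrip (PySem.Chars.lstrip (comment.dropWhile (· == '#')))).all
          (fun c => PySem.Chars.isIn [c] ['=','-','~','*'])) =
        ((!(PySem.Chars.strip (comment.dropWhile (· == '#'))).isEmpty) &&
        (PySem.Chars.strip (comment.dropWhile (· == '#'))).all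
          (fun c => ['=','-','~','*'].contains c)) := by
      have hstrip : PySem.Chars.strip (comment.dropWhile (· == '#')) =
          PySem.Chars.rstrip (PySem.Chars.lstrip (comment.dropWhile (· == '#'))) := rfl
      rw [hstrip]
      simp only [isIn_singleton]
      rcases he : (PySem.Chars.lstrip (comment.dropWhile (· == '#'))).isEmpty with _ | _
      · have hne := rstrip_lstrip_ne (comment.dropWhile (· == '#')) (by simp [he])
        have hre : (PySem.Chars.rstrip (PySem.Chars.lstrip (comment.dropWhile (· == '#')))).isEmpty = false := by
          rcases hx : (PySem.Chars.rstrip (PySem.Chars.lstrip (comment.dropWhile (· == '#')))).isEmpty with _ | _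
          · rfl
          · exact absurd hx hne
        rw [hre]
      · have hl : PySem.Chars.lstrip (comment.dropWhile (· == '#')) = [] := List.isEmpty_iff.mp he
        simp [hl, PySem.Chars.rstrip]
    have hcoding : (PySem.Chars.isIn [':'] comment || PySem.Chars.isIn ['='] comment) =
        comment.any (fun c => c == ':' || c == '=') := by
      rw [isIn_singleton, isIn_singleton]
      rw [Bool.eq_iff_iff]
      simp only [Bool.or_eq_true, List.contains_eq_mem, List.any_eq_true, beq_iff_eq,
        decide_eq_true_eq]
      constructor
      · rintro (h | h)
        · exact ⟨':', h, Or.inl rfl⟩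
        · exact ⟨'=', h, Or.inr rfl⟩
      · rintro ⟨c, hc, rfl | rfl⟩
        · exact Or.inl hc
        · exact Or.inr hc
    rw [hdiv, hcoding]
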